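-- pv_equiv track=rewrite | github.com/chluebi/AdventOfCode2021 | 18/solved.py | get_side
-- ===== SOURCE A (Python) =====
-- def get_side(path, side):
--     if len(path) == 0:
--         return None
--     if side == 'l':
--         if path[-1] == 'r':
--             return path[:-1] + 'l'
--         else:
--             return get_side(path[:-1], side)
--     else:
--         if path[-1] == 'l':
--             return path[:-1] + 'r'
--         else:
--             return get_side(path[:-1], side)
-- ===== SOURCE B (Python) =====
-- def get_side(path, side):
--     if side == 'l':
--         opp, rep = 'r', 'l'
--     else:
--         opp, rep = 'l', 'r'
--     for i in range(len(path) - 1, -1, -1):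
--         if path[i] == opp:
--             return path[:i] + rep
--     return None
-- ===== Notes on version B (the rewrite author's own statement) =====
-- stated objective: faster
-- what changed: Replaces the character-peeling recursion (which copies a fresh length-k prefix string at every step) with a single backward index scan that slices only once at the match.
import Mathlib
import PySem

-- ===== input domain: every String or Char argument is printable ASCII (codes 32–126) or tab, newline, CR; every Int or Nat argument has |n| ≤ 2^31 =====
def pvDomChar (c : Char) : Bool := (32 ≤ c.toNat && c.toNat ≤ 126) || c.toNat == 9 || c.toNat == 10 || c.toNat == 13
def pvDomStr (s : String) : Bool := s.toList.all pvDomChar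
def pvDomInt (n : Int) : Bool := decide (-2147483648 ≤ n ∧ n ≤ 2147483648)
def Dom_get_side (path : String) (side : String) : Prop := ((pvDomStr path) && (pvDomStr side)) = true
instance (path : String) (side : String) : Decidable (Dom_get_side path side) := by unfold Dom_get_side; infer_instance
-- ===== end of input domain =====

-- B: same outputs via one backward index scan instead of A's prefix-slicing recursion (objective: simpler).
-- ===== PORT A =====
-- recursion of A on the char list; path[-1] -> getLast?, path[:-1] -> dropLast
def getSideRecA (l : List Char) (side : String) : Option String :=
  if l.length = 0 then none
  else if side = "l" then
    if l.getLast? = some 'r' then some (String.ofList (l.dropLast ++ ['l']))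
    else getSideRecA l.dropLast side
  else
    if l.getLast? = some 'l' then some (String.ofList (l.dropLast ++ ['r']))
    else getSideRecA l.dropLast side
termination_by l.length
decreasing_by all_goals · simp [List.length_dropLast]; omega

def get_side (path : String) (side : String) : Option String :=
  getSideRecA path.toList side

-- ===== PORT B =====
-- the backward loop of Source B: index i runs n-1, n-2, …, 0 (argument is i+1; 0 = loop exhausted)
def scanBackB (l : List Char) (opp rep : Char) : Nat → Option String
  | 0 => none
  | i + 1 => if l[i]? = some opp then some (String.ofList (l.take i ++ [rep])) else scanBackB l opp rep i

def get_side_alt (path : String) (side : String) : Option String :=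
  scanBackB path.toList (if side = "l" then 'r' else 'l')
    (if side = "l" then 'l' else 'r') path.toList.length

-- ===== PRECONDITION & SPEC =====
def Spec_get_side (path : String) (side : String) (out : Option String) : Prop := out = get_side_alt path side
instance (path : String) (side : String) (out : Option String) : Decidable (Spec_get_side path side out) := by unfold Spec_get_side; infer_instance

-- ===== CLAIM (what is proved, stated in full; the proofs are below) =====
def Claim_equal_get_side : Prop := ∀ (path : String) (side : String), Dom_get_side path side → Spec_get_side path side (get_side path side)

-- ===== LEMMAS AND PROOFS =====

-- ===== VERDICT (by name: the statement is the Claim_ definition above) =====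
-- scanBackB only looks at indices < i, so the last element may be dropped
theorem scanBackB_dropLast (l : List Char) (opp rep : Char) (i : Nat) (h : i < l.length) :
    scanBackB l opp rep i = scanBackB l.dropLast opp rep i := by
  induction i with
  | zero => rfl
  | succ k ih =>
    have hk : k < l.length := Nat.lt_of_succ_lt h
    have hdl : k < l.dropLast.length := by simp [List.length_dropLast]; omega
    have hget : l.dropLast[k]? = l[k]? := by
      rw [List.getElem?_eq_getElem hk, List.getElem?_eq_getElem hdl, List.getElem_dropLast]
    have htake : l.dropLast.take k = l.take k := by
      rw [List.dropLast_eq_take, List.take_take]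
      congr 1; omega
    simp only [scanBackB, hget, htake, ih hk]

theorem rec_eq_scan (l : List Char) (side : String) :
    getSideRecA l side =
      scanBackB l (if side = "l" then 'r' else 'l') (if side = "l" then 'l' else 'r')
        l.length := by
  induction hn : l.length generalizing l with
  | zero =>
    have : l = [] := List.eq_nil_of_length_eq_zero hn
    subst this
    by_cases hs : side = "l" <;> simp [getSideRecA, scanBackB, hs]
  | succ n ih =>
    have h0 : ¬ (l.length = 0) := by omega
    have hlast : l.getLast? = l[n]? := by
      rw [List.getLast?_eq_getElem?]; congr 1; omega
    have hdln : l.dropLast.length = n := by simp [List.length_dropLast, hn]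
    have hdrop : l.dropLast = l.take n := by
      rw [List.dropLast_eq_take, hn]; rfl
    have hscan : scanBackB l (if side = "l" then 'r' else 'l')
        (if side = "l" then 'l' else 'r') n
        = scanBackB l.dropLast (if side = "l" then 'r' else 'l')
          (if side = "l" then 'l' else 'r') n := by
      apply scanBackB_dropLast; omega
    rw [getSideRecA, if_neg h0, scanBackB, hscan, hlast, hdrop]
    by_cases hs : side = "l"
    · rw [if_pos hs]
      simp only [hs, reduceIte]
      split
      · rfl
      · simpa [hs] using ih (List.take n l) (by simp [hn])
    · rw [if_neg hs]
      simp only [hs, reduceIte]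
      split
      · rfl
      · simpa [hs] using ih (List.take n l) (by simp [hn])

theorem get_side_spec : Claim_equal_get_side := by
  intro path side _
  unfold Spec_get_side get_side get_side_alt
  exact rec_eq_scan path.toList side
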